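-- pv_equiv track=rewrite | github.com/manuelklug/learning | Python UNSAM/Clase 3/propaga.py | propagar
-- ===== SOURCE A (Python) =====
-- def propagar(lista):
--
--     # Propagación hacia la derecha (para adelante)
--     for i in range(0, len(lista)-1):
--         if lista[i] == 1 and lista[i+1] == 0:
--             lista[i+1] = 1
--
--     # Propagación hacia la izquierda (para atrás)
--     for j in range(len(lista)-1, 0, -1):
--         if lista[j] == 1 and lista[j-1] == 0:
--             lista[j-1] = 1
--
--     return lista
-- ===== SOURCE B (Python) =====
-- def propagar(lista):
--     # Single run-detection pass: find each maximal run of 0s and fill it with 1s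
--     # iff a neighbouring element is 1; non-zero elements are left untouched.
--     res = []
--     izq1 = False  # is the element to the left (if any) equal to 1?
--     i = 0
--     n = len(lista)
--     while i < n:
--         x = lista[i]
--         if x != 0:
--             res.append(x)
--             izq1 = x == 1
--             i += 1
--         else:
--             j = i
--             while j < n and lista[j] == 0:
--                 j += 1
--             v = 1 if (izq1 or (j < n and lista[j] == 1)) else 0
--             res.extend([v] * (j - i))
--             izq1 = v == 1
--             i = j
--     lista[:] = res
--     return lista
-- ===== Notes on version B (the rewrite author's own statement) =====
-- stated objective: alternative
-- what changed: Replaces A's two cascading in-place sweeps (forward then backward over indices) by a single left-to-right pass that detects each maximal run of 0s and fills it with 1s iff the element adjacent to the run on either side equals 1, building the result in one traversal.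
import Mathlib
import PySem

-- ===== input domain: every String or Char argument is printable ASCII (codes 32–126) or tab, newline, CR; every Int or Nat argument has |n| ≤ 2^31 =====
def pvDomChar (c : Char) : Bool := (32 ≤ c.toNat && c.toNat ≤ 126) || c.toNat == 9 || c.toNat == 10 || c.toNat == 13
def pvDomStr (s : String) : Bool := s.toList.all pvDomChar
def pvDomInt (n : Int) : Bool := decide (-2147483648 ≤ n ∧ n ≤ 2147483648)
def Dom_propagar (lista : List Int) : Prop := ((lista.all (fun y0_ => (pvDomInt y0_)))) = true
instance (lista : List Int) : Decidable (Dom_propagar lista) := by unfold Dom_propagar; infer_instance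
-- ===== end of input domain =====

-- B replaces A's two cascading sweeps by one run-detection pass (each maximal run of
-- 0s is filled with 1s iff a neighbouring element equals 1); equivalence is about the
-- RETURN value (both Pythons also leave the argument list holding the same content).

-- ===== PORT A =====
-- Every index produced by the two ranges is in range, so the total forms
-- pyGetD / pySetD are exact here.  The two loop bodies:
def pvStepF (acc : List Int) (i : Int) : List Int :=
  if PySem.List.pyGetD acc i 0 = 1 ∧ PySem.List.pyGetD acc (i + 1) 0 = 0 then
    PySem.List.pySetD acc (i + 1) 1
  else acc

def pvStepB (acc : List Int) (j : Int) : List Int :=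
  if PySem.List.pyGetD acc j 0 = 1 ∧ PySem.List.pyGetD acc (j - 1) 0 = 0 then
    PySem.List.pySetD acc (j - 1) 1
  else acc

def propagar (lista : List Int) : List Int :=
  let n : Int := (lista.length : Int)
  -- Propagación hacia la derecha (para adelante)
  let l1 := (PySem.List.pyRange 0 (n - 1) 1).foldl pvStepF lista
  -- Propagación hacia la izquierda (para atrás)
  (PySem.List.pyRange (n - 1) 0 (-1)).foldl pvStepB l1

-- ===== PORT B =====
-- the while loop of Source B: recursion on the remaining suffix `resto`, with the loop
-- state (izq1, res) of Source B; the inner zero-scanning while is takeWhile/dropWhile.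
def pvRunB (resto : List Int) (izq1 : Bool) (res : List Int) : List Int :=
  match resto with
  | [] => res
  | x :: t =>
    if x ≠ 0 then pvRunB t (x == 1) (res ++ [x])
    else
      let k := 1 + (t.takeWhile (fun y => y == 0)).length
      let cola := t.dropWhile (fun y => y == 0)
      let v : Int := if izq1 || (cola.head? == some 1) then 1 else 0
      pvRunB cola (v == 1) (res ++ List.replicate k v)
termination_by resto.length
decreasing_by
  all_goals simp only [List.length_cons]
  all_goals first
    | omega
    | exact Nat.lt_succ_of_le (List.length_dropWhile_le _ _)

def propagar_alt (lista : List Int) : List Int := pvRunB lista false []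

-- ===== PRECONDITION & SPEC =====
def Spec_propagar (lista : List Int) (out : List Int) : Prop := out = propagar_alt lista
instance (lista : List Int) (out : List Int) : Decidable (Spec_propagar lista out) := by unfold Spec_propagar; infer_instance

-- ===== CLAIM (what is proved, stated in full; the proofs are below) =====
def Claim_equal_propagar : Prop := ∀ (lista : List Int), Dom_propagar lista → Spec_propagar lista (propagar lista)

-- ===== LEMMAS AND PROOFS =====

-- A's forward sweep, as a cascade with left-context value c
def pvF (c : Int) : List Int → List Int
  | [] => []
  | y :: t =>
    let y' := if c = 1 ∧ y = 0 then 1 else y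
    y' :: pvF y' t

-- A's backward sweep, as a right-to-left cascade (d = value past the right end)
def pvKc (d : Int) : List Int → List Int
  | [] => []
  | y :: t =>
    let t' := pvKc d t
    (if y = 0 ∧ t'.headD d = 1 then 1 else y) :: t'

theorem pvF_cons (c y : Int) (t : List Int) :
    pvF c (y :: t) = (if c = 1 ∧ y = 0 then 1 else y) :: pvF (if c = 1 ∧ y = 0 then 1 else y) t := rfl

theorem pvKc_cons (d y : Int) (t : List Int) :
    pvKc d (y :: t) = (if y = 0 ∧ (pvKc d t).headD d = 1 then 1 else y) :: pvKc d t := rfl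

theorem pvKc_cons_ne (d y : Int) (t : List Int) (h : y ≠ 0) :
    pvKc d (y :: t) = y :: pvKc d t := by
  rw [pvKc_cons, if_neg (fun hc => h hc.1)]

theorem pvF_length (c : Int) (l : List Int) : (pvF c l).length = l.length := by
  induction l generalizing c with
  | nil => rfl
  | cons y t ih => simp [pvF, ih]

theorem headD_append_singleton (u : List Int) (a d : Int) : (u ++ [a]).headD d = u.headD a := by
  cases u <;> simp

theorem pvKc_snoc (X w : Int) (t : List Int) :
    pvKc X (t ++ [w]) =
      pvKc (if w = 0 ∧ X = 1 then 1 else w) t ++ [if w = 0 ∧ X = 1 then 1 else w] := by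
  induction t with
  | nil => simp [pvKc]
  | cons y s ih =>
    rw [List.cons_append, pvKc_cons, ih, pvKc_cons]
    rw [headD_append_singleton]
    simp [List.cons_append]

theorem pvF_one_zeros (k : Nat) (t : List Int) :
    pvF 1 (List.replicate k 0 ++ t) = List.replicate k 1 ++ pvF 1 t := by
  induction k with
  | zero => simp
  | succ k ih => simp [List.replicate_succ, pvF_cons, ih]

theorem pvF_zero_zeros (k : Nat) (t : List Int) :
    pvF 0 (List.replicate k 0 ++ t) = List.replicate k 0 ++ pvF 0 t := by
  induction k with
  | zero => simp
  | succ k ih => simp [List.replicate_succ, pvF_cons, ih]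

theorem pvKc_ones (k : Nat) (m : List Int) :
    pvKc 0 (List.replicate k 1 ++ m) = List.replicate k 1 ++ pvKc 0 m := by
  induction k with
  | zero => simp
  | succ k ih => simp [List.replicate_succ, pvKc_cons_ne 0 1 _ one_ne_zero, ih]

theorem pvKc_zeros (k : Nat) (m : List Int) :
    pvKc 0 (List.replicate k 0 ++ m) =
      List.replicate k (if (pvKc 0 m).headD 0 = 1 then (1:Int) else 0) ++ pvKc 0 m := by
  induction k with
  | zero => simp
  | succ k ih =>
    simp only [List.replicate_succ, List.cons_append, pvKc_cons, ih]
    congr 1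
    cases k with
    | zero => simp
    | succ k2 => simp only [List.replicate_succ, List.cons_append]; simp

-- the forward index loop equals the cascade pvF
theorem fwd_aux (t : List Int) : ∀ (a : List Int) (x : Int),
    (PySem.List.pyRange (a.length : Int) ((a.length : Int) + (t.length : Int)) 1).foldl
        pvStepF (a ++ x :: t)
      = a ++ x :: pvF x t := by
  induction t with
  | nil =>
    intro a x
    rw [PySem.List.pyRange_one_eq_nil (by simp)]
    simp [pvF]
  | cons y t' ih =>
    intro a x
    rw [PySem.List.pyRange_one_cons (by push_cast [List.length_cons]; omega), List.foldl_cons]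
    have hcast : ((a.length : Int) + 1) = ((a.length + 1 : Nat) : Int) := by push_cast; ring
    have hstep : pvStepF (a ++ x :: y :: t') (a.length : Int)
        = (a ++ [x]) ++ (if x = 1 ∧ y = 0 then (1:Int) else y) :: t' := by
      unfold pvStepF
      have h1 : PySem.List.pyGetD (a ++ x :: y :: t') (a.length : Int) 0 = x := by
        rw [PySem.List.pyGetD_natCast]; simp [List.getD]
      have h2 : PySem.List.pyGetD (a ++ x :: y :: t') ((a.length : Int) + 1) 0 = y := by
        rw [hcast, PySem.List.pyGetD_natCast]; simp [List.getD]
      have h3 : PySem.List.pySetD (a ++ x :: y :: t') ((a.length : Int) + 1) 1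
          = (a ++ [x]) ++ (1:Int) :: t' := by
        rw [hcast, PySem.List.pySetD_natCast, List.set_append_right _ _ (by omega)]
        simp
      rw [h1, h2]
      by_cases hxy : x = 1 ∧ y = 0
      · rw [if_pos hxy, h3, if_pos hxy]
      · rw [if_neg hxy, if_neg hxy]; simp
    rw [hstep]
    have harg1 : ((a.length : Int) + 1) = (((a ++ [x]).length : Nat) : Int) := by simp
    have harg2 : ((a.length : Int) + ((y :: t').length : Int))
        = (((a ++ [x]).length : Nat) : Int) + (t'.length : Int) := by simp; ring
    rw [harg1, harg2, ih (a ++ [x]) (if x = 1 ∧ y = 0 then (1:Int) else y)]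
    rw [pvF_cons]
    simp

theorem fwd_main (l : List Int) :
    (PySem.List.pyRange 0 ((l.length : Int) - 1) 1).foldl pvStepF l = pvF 0 l := by
  cases l with
  | nil => rw [PySem.List.pyRange_one_eq_nil (by simp)]; simp [pvF]
  | cons x t =>
    have h := fwd_aux t [] x
    simp only [List.nil_append, List.length_nil, Nat.cast_zero, zero_add] at h
    have harg : ((x :: t).length : Int) - 1 = (t.length : Int) := by simp
    rw [harg, h, pvF_cons]
    simp

-- the backward index loop equals the cascade pvKc
theorem bwd_aux (t : List Int) : ∀ (x : Int) (rest : List Int),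
    (PySem.List.pyRange (t.length : Int) 0 (-1)).foldl pvStepB (t ++ x :: rest)
      = pvKc x t ++ x :: rest := by
  induction t using List.reverseRecOn with
  | nil =>
    intro x rest
    rw [PySem.List.pyRange_neg_one_eq_nil (by simp)]
    simp [pvKc]
  | append_singleton t0 w ih =>
    intro x rest
    have hlen : (((t0 ++ [w]).length : Nat) : Int) = (t0.length : Int) + 1 := by simp
    rw [hlen, PySem.List.pyRange_neg_one_cons (by positivity), List.foldl_cons]
    have hcast : ((t0.length : Int) + 1 - 1) = ((t0.length : Nat) : Int) := by ring
    have hstep : pvStepB ((t0 ++ [w]) ++ x :: rest) ((t0.length : Int) + 1)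
        = t0 ++ (if w = 0 ∧ x = 1 then (1:Int) else w) :: x :: rest := by
      unfold pvStepB
      have e1 : (t0 ++ [w]) ++ x :: rest = t0 ++ w :: x :: rest := by simp
      rw [e1]
      have hcast1 : ((t0.length : Int) + 1) = ((t0.length + 1 : Nat) : Int) := by push_cast; ring
      have h1 : PySem.List.pyGetD (t0 ++ w :: x :: rest) ((t0.length : Int) + 1) 0 = x := by
        rw [hcast1, PySem.List.pyGetD_natCast]; simp [List.getD]
      have h2 : PySem.List.pyGetD (t0 ++ w :: x :: rest) ((t0.length : Int) + 1 - 1) 0 = w := by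
        rw [hcast, PySem.List.pyGetD_natCast]; simp [List.getD]
      have h3 : PySem.List.pySetD (t0 ++ w :: x :: rest) ((t0.length : Int) + 1 - 1) 1
          = t0 ++ (1:Int) :: x :: rest := by
        rw [hcast, PySem.List.pySetD_natCast, List.set_append_right _ _ (le_refl _)]
        simp
      rw [h1, h2]
      by_cases hc : x = 1 ∧ w = 0
      · rw [if_pos hc, h3, if_pos ⟨hc.2, hc.1⟩]
      · rw [if_neg hc, if_neg (fun h => hc ⟨h.2, h.1⟩)]
    rw [hstep, hcast, ih (if w = 0 ∧ x = 1 then (1:Int) else w) (x :: rest)]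
    rw [pvKc_snoc]
    simp

theorem bwd_main (m : List Int) :
    (PySem.List.pyRange ((m.length : Int) - 1) 0 (-1)).foldl pvStepB m = pvKc 0 m := by
  cases m using List.reverseRecOn with
  | nil => rw [PySem.List.pyRange_neg_one_eq_nil (by simp)]; simp [pvKc]
  | append_singleton t0 w =>
    have harg : (((t0 ++ [w]).length : Nat) : Int) - 1 = (t0.length : Int) := by simp
    rw [harg, bwd_aux t0 w [], pvKc_snoc]
    simp

-- A's full result is the composition of the two cascades
theorem propagar_eq_cascades (l : List Int) : propagar l = pvKc 0 (pvF 0 l) := by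
  show (PySem.List.pyRange ((l.length : Int) - 1) 0 (-1)).foldl pvStepB
      ((PySem.List.pyRange 0 ((l.length : Int) - 1) 1).foldl pvStepF l) = pvKc 0 (pvF 0 l)
  rw [fwd_main]
  have hl : ((l.length : Int) - 1) = (((pvF 0 l).length : Int) - 1) := by rw [pvF_length]
  rw [hl, bwd_main]

theorem takeWhile_zero_replicate (t : List Int) :
    t.takeWhile (fun y => y == (0:Int))
      = List.replicate (t.takeWhile (fun y => y == (0:Int))).length 0 := by
  rw [List.eq_replicate_iff]
  refine ⟨rfl, ?_⟩
  intro b hb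
  have := List.mem_takeWhile_imp hb
  simpa using this

-- B's run-filling pass equals the composition of the two cascades
theorem pvRunB_eq (n : Nat) : ∀ (l : List Int), l.length ≤ n → ∀ (c : Int) (res : List Int),
    pvRunB l (c == 1) res = res ++ pvKc 0 (pvF c l) := by
  induction n with
  | zero =>
    intro l hl c res
    have : l = [] := List.eq_nil_of_length_eq_zero (Nat.le_zero.mp hl)
    subst this
    simp [pvRunB, pvF, pvKc]
  | succ n ih =>
    intro l hl c res
    cases l with
    | nil => simp [pvRunB, pvF, pvKc]
    | cons x t =>
      by_cases hx : x = 0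
      · subst hx
        rw [pvRunB, if_neg (by simp)]
        set kt := (t.takeWhile (fun y => y == (0:Int))).length with hkt
        set cola := t.dropWhile (fun y => y == (0:Int)) with hcola
        have ht : List.replicate kt 0 ++ cola = t := by
          rw [hkt, hcola, ← takeWhile_zero_replicate, List.takeWhile_append_dropWhile]
        have hcl : cola.length ≤ n := by
          have h1 : cola.length ≤ t.length := by rw [hcola]; exact List.length_dropWhile_le _ _
          simp only [List.length_cons] at hl
          omega
        have hka : 1 + kt = kt + 1 := Nat.add_comm 1 kt
        have hF : ∀ c' : Int, ¬ c' = 1 → pvF c' (0 :: t)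
            = List.replicate (kt + 1) 0 ++ pvF 0 cola := by
          intro c' hc'
          rw [pvF_cons, if_neg (fun h => hc' h.1), ← ht, pvF_zero_zeros]
          simp [List.replicate_succ]
        by_cases hc : c = 1
        · subst hc
          simp only [beq_self_eq_true, Bool.true_or, if_pos]
          have hrec := ih cola hcl 1 (res ++ List.replicate (1 + kt) 1)
          simp only [show ((1:Int) == 1) = true by decide] at hrec ⊢
          rw [hrec]
          have hF1 : pvF 1 (0 :: t) = List.replicate (kt + 1) 1 ++ pvF 1 cola := by
            rw [pvF_cons, if_pos ⟨rfl, rfl⟩, ← ht, pvF_one_zeros]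
            simp [List.replicate_succ]
          rw [hF1, pvKc_ones, hka]
          simp [List.append_assoc]
        · have hb : (c == 1) = false := by simp [hc]
          rw [hb]
          simp only [Bool.false_or]
          cases hcc : cola with
          | nil =>
            rw [hF c hc]
            have hrec := ih cola hcl 0 (res ++ List.replicate (1 + kt) 0)
            simp only [show ((0:Int) == 1) = false from by decide] at hrec
            rw [hcc] at hrec
            have hz := pvKc_zeros (kt + 1) []
            simp only [List.append_nil, pvKc, List.headD_nil] at hz
            simp only [List.head?_nil,
              show ((none : Option Int) == some 1) = false from by decide]
            rw [if_neg (by simp)]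
            rw [hcc]
            simp [pvRunB, pvF, hz, hka]
          | cons r rs =>
            have hr : r ≠ 0 := by
              have h5 := List.head?_dropWhile_not (fun y => y == (0:Int)) t
              rw [← hcola, hcc] at h5
              simpa using h5
            have hFr : pvF 0 (r :: rs) = r :: pvF r rs := by
              rw [pvF_cons, if_neg (by simp)]
            by_cases hr1 : r = 1
            · subst hr1
              rw [hF c hc, hcc]
              simp only [List.head?_cons,
                show ((some (1:Int)) == some 1) = true from by decide]
              simp only [if_true, show ((1:Int) == 1) = true from by decide]
              have hrec := ih cola hcl 1 (res ++ List.replicate (1 + kt) 1)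
              simp only [show ((1:Int) == 1) = true from by decide] at hrec
              rw [hcc] at hrec
              rw [hrec, pvKc_zeros]
              have hF11 : pvF 1 (1 :: rs) = 1 :: pvF 1 rs := by
                rw [pvF_cons]; simp
              rw [hF11, hFr, pvKc_cons_ne _ _ _ one_ne_zero]
              simp [hka, List.append_assoc]
            · rw [hF c hc, hcc]
              simp only [List.head?_cons,
                show ((some r) == some (1:Int)) = false from by simp [hr1]]
              rw [if_neg (by simp)]
              simp only [show ((0:Int) == 1) = false from by decide]
              have hrec := ih cola hcl 0 (res ++ List.replicate (1 + kt) 0)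
              simp only [show ((0:Int) == 1) = false from by decide] at hrec
              rw [hcc] at hrec
              rw [hrec, pvKc_zeros, hFr, pvKc_cons_ne _ _ _ hr]
              simp [hr1, hka, List.append_assoc]
      · rw [pvRunB, if_pos hx]
        have hrec := ih t (by simp only [List.length_cons] at hl; omega) x (res ++ [x])
        rw [hrec, pvF_cons, if_neg (fun h => hx h.2), pvKc_cons_ne _ _ _ hx]
        simp

-- ===== VERDICT (by name: the statement is the Claim_ definition above) =====
theorem propagar_spec : Claim_equal_propagar := by
  intro lista _
  unfold Spec_propagar propagar_alt
  have h := pvRunB_eq lista.length lista (le_refl _) 0 []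
  simp only [show ((0:Int) == 1) = false by decide] at h
  rw [h, List.nil_append, propagar_eq_cascades]
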